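-- pv_equiv track=rewrite | github.com/LITONG99/tear | utils.py | load_header
-- ===== SOURCE A (Python) =====
-- from collections import defaultdict
--
-- def get_headers_in_table(table, multiple_entity=False):
--     h = []
--     if multiple_entity:
--         for entity in table:
--             for rid in table[entity]: h += list(table[entity][rid].keys())
--     else:
--         for rid in table:
--             h += list(table[rid].keys())
--     return list(set(h))
--
-- def load_header(data, entities, labeled_headers, keep_new=True):
--     # Prepare for define
--     entity_headers = defaultdict(list)
--     for idx in data:
--         if idx == 'extracted_version':
--             continue
--         for entity in data[idx]:
--             if not entity in entities: continue
--             tmp = get_headers_in_table(data[idx], multiple_entity=True)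
--             for h in tmp:
--                 if (keep_new and not h in labeled_headers) or (not keep_new and h in labeled_headers):
--                     entity_headers[h].append(idx)
--     return entity_headers
-- ===== SOURCE B (Python) =====
-- def load_header(data, entities, labeled_headers, keep_new=True):
--     entity_set = set(entities)
--     labeled_set = set(labeled_headers)
--     entity_headers = {}
--     for idx in data:
--         if idx == 'extracted_version':
--             continue
--         table = data[idx]
--         m = sum(1 for entity in table if entity in entity_set)
--         if m == 0:
--             continue
--         seen = set()
--         for entity in table:
--             for rid in table[entity]:
--                 seen.update(table[entity][rid].keys())
--         for h in seen:
--             if (h in labeled_set) != keep_new: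
--                 entity_headers.setdefault(h, []).extend([idx] * m)
--     return entity_headers
-- ===== Notes on version B (the rewrite author's own statement) =====
-- stated objective: faster
-- what changed: B hashes entities and labeled_headers into sets once, counts the matching entities of each table in one pass, collects the table's header set in a single pass, and extends each qualifying header's list with [idx]*m at once, instead of A's per-entity recomputation of the header set and per-entity list-membership scans.
import Mathlib
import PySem

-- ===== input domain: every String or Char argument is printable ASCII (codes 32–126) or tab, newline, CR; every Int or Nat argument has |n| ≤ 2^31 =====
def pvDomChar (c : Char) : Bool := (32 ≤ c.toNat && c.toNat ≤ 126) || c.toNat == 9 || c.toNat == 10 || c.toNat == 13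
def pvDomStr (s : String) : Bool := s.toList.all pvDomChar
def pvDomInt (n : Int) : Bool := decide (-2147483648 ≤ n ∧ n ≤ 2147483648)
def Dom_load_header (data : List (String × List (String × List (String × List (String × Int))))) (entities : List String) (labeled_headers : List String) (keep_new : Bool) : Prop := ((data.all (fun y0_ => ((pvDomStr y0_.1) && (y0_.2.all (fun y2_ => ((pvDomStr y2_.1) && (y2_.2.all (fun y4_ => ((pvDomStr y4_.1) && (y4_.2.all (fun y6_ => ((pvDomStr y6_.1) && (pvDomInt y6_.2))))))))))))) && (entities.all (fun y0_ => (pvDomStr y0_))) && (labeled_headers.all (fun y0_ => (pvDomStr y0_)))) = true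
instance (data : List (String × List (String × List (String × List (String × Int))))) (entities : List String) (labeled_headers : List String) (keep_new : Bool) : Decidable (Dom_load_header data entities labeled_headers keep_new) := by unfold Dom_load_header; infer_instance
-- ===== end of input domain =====

-- ===== PORT A =====
-- B computes the table's header set once per idx and extends each qualifying header's
-- list with [idx]*m (m = matching entities), instead of A's per-entity recomputation: faster.
def get_headers_in_table_A (table : List (String × List (String × List (String × Int)))) : List String :=
  PySem.Set.ofList
    (table.foldl (fun h ep => ep.2.foldl (fun h2 rp => h2 ++ rp.2.map Prod.fst) h) [])

def load_header (data : List (String × List (String × List (String × List (String × Int))))) (entities : List String) (labeled_headers : List String) (keep_new : Bool) : List (String × List String) :=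
  (data.foldl
    (fun (eh : PySem.Dict String (List String)) p =>
      if p.1 == "extracted_version" then eh
      else
        p.2.foldl
          (fun eh2 ent =>
            if !(entities.contains ent.1) then eh2
            else
              (get_headers_in_table_A p.2).foldl
                (fun eh3 h =>
                  if (keep_new && !(labeled_headers.contains h)) || (!keep_new && labeled_headers.contains h)
                  then eh3.insert h (eh3.getD h [] ++ [p.1]) else eh3)
                eh2)
          eh)
    PySem.Dict.empty).items

-- ===== PORT B =====
def load_header_alt (data : List (String × List (String × List (String × List (String × Int))))) (entities : List String) (labeled_headers : List String) (keep_new : Bool) : List (String × List String) :=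
  let entity_set := PySem.Set.ofList entities
  let labeled_set := PySem.Set.ofList labeled_headers
  (data.foldl
    (fun (eh : PySem.Dict String (List String)) (p : String × List (String × List (String × List (String × Int)))) =>
      if p.1 == "extracted_version" then eh
      else
        let m := p.2.countP (fun ent => PySem.Set.contains entity_set ent.1)
        if m = 0 then eh
        else
          let seen := p.2.foldl
            (fun s ep => ep.2.foldl (fun s2 rp => PySem.Set.update s2 (rp.2.map Prod.fst)) s)
            PySem.Set.empty
          seen.foldl
            (fun eh2 h =>
              if PySem.Set.contains labeled_set h != keep_new
              then eh2.insert h (eh2.getD h [] ++ List.replicate m p.1) else eh2)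
            eh)
    PySem.Dict.empty).items

-- ===== PRECONDITION & SPEC =====
def Spec_load_header (data : List (String × List (String × List (String × List (String × Int))))) (entities : List String) (labeled_headers : List String) (keep_new : Bool) (out : List (String × List String)) : Prop := out = load_header_alt data entities labeled_headers keep_new
instance (data : List (String × List (String × List (String × List (String × Int))))) (entities : List String) (labeled_headers : List String) (keep_new : Bool) (out : List (String × List String)) : Decidable (Spec_load_header data entities labeled_headers keep_new out) := by unfold Spec_load_header; infer_instance

-- ===== CLAIM (what is proved, stated in full; the proofs are below) =====
def Claim_equal_load_header : Prop := ∀ (data : List (String × List (String × List (String × List (String × Int))))) (entities : List String) (labeled_headers : List String) (keep_new : Bool), Dom_load_header data entities labeled_headers keep_new → Spec_load_header data entities labeled_headers keep_new (load_header data entities labeled_headers keep_new)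

-- ===== LEMMAS AND PROOFS =====


-- one filtering pass over the header list t, appending L to each qualifying key's list
def pvPass (q : String → Bool) (L : List String) (t : List String)
    (d : PySem.Dict String (List String)) : PySem.Dict String (List String) :=
  t.foldl (fun e h => if q h then e.insert h (e.getD h [] ++ L) else e) d

lemma pv_insert_comm {d : PySem.Dict String (List String)} {k k' : String}
    (v w : List String) (hk : d.contains k = true) (hne : k ≠ k') :
    (d.insert k v).insert k' w = (d.insert k' w).insert k v := by
  apply PySem.Dict.ext
  have hck' : (d.insert k v).contains k' = d.contains k' := by
    rw [PySem.Dict.contains_insert]; simp [beq_iff_eq, Ne.symm hne]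
  have hck : (d.insert k' w).contains k = true := by
    rw [PySem.Dict.contains_insert]; simp [hk]
  cases hd : d.contains k'
  · rw [PySem.Dict.items_insert_of_not_contains _ w (by rw [hck']; exact hd),
        PySem.Dict.items_insert_of_contains _ v hk,
        PySem.Dict.items_insert_of_contains _ v hck,
        PySem.Dict.items_insert_of_not_contains _ w hd, List.map_append]
    simp [beq_iff_eq, Ne.symm hne]
  · rw [PySem.Dict.items_insert_of_contains _ w (by rw [hck']; exact hd),
        PySem.Dict.items_insert_of_contains _ v hk,
        PySem.Dict.items_insert_of_contains _ v hck,
        PySem.Dict.items_insert_of_contains _ w hd, List.map_map, List.map_map]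
    apply List.map_congr_left
    intro p _
    by_cases hp : p.1 = k <;> by_cases hp' : p.1 = k' <;>
      simp [Function.comp, hp, hp', beq_iff_eq, hne, Ne.symm hne]
lemma pvPass_cons (q : String → Bool) (L : List String) (h : String) (t : List String)
    (d : PySem.Dict String (List String)) :
    pvPass q L (h :: t) d
      = pvPass q L t (if q h = true then d.insert h (d.getD h [] ++ L) else d) := by
  simp only [pvPass, List.foldl_cons]

lemma pv_getD_pass (q : String → Bool) (L : List String) (t : List String)
    (d : PySem.Dict String (List String)) {k : String} (hk : k ∉ t) :
    (pvPass q L t d).getD k [] = d.getD k [] := by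
  induction t generalizing d with
  | nil => rfl
  | cons h r ih =>
    have hne : k ≠ h := fun e => hk (e ▸ List.mem_cons_self ..)
    have hkr : k ∉ r := fun e => hk (List.mem_cons_of_mem _ e)
    rw [pvPass_cons]
    by_cases hq : q h = true
    · rw [if_pos hq, ih _ hkr, PySem.Dict.getD_insert_of_ne _ _ _ hne]
    · rw [if_neg hq]
      exact ih _ hkr

lemma pv_pass_insert (q : String → Bool) (L : List String) (t : List String)
    (d : PySem.Dict String (List String)) {k : String} (v : List String)
    (hk : k ∉ t) (hc : d.contains k = true) :
    pvPass q L t (d.insert k v) = (pvPass q L t d).insert k v := by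
  induction t generalizing d with
  | nil => rfl
  | cons h r ih =>
    have hne : k ≠ h := fun e => hk (e ▸ List.mem_cons_self ..)
    have hkr : k ∉ r := fun e => hk (List.mem_cons_of_mem _ e)
    rw [pvPass_cons, pvPass_cons]
    by_cases hq : q h = true
    · rw [if_pos hq, if_pos hq,
          PySem.Dict.getD_insert_of_ne _ _ _ (Ne.symm hne),
          pv_insert_comm _ _ hc hne]
      exact ih _ hkr (by rw [PySem.Dict.contains_insert]; simp [hc])
    · rw [if_neg hq, if_neg hq]
      exact ih _ hkr hc

lemma pv_pass_pass (q : String → Bool) (L1 L2 : List String) (t : List String)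
    (d : PySem.Dict String (List String)) (hn : t.Nodup) :
    pvPass q L2 t (pvPass q L1 t d) = pvPass q (L1 ++ L2) t d := by
  induction t generalizing d with
  | nil => rfl
  | cons h r ih =>
    rcases List.nodup_cons.mp hn with ⟨hhr, hnr⟩
    rw [pvPass_cons q L1, pvPass_cons q L2, pvPass_cons q (L1 ++ L2)]
    by_cases hq : q h = true
    · rw [if_pos hq, if_pos hq, if_pos hq,
          pv_getD_pass q L1 r _ hhr, PySem.Dict.getD_insert_self,
          ← pv_pass_insert q L1 r _ _ hhr (PySem.Dict.contains_insert_self _ _ _),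
          PySem.Dict.insert_insert_self, List.append_assoc]
      exact ih _ hnr
    · rw [if_neg hq, if_neg hq, if_neg hq]
      exact ih _ hnr

-- A's loop over the table's entities = one pvPass with List.replicate m idx (m = matching count)
lemma pv_entity_fold (entities : List String) (q : String → Bool) (tmp : List String)
    (idx : String) (table : List (String × List (String × List (String × Int))))
    (d : PySem.Dict String (List String)) (hn : tmp.Nodup) :
    table.foldl (fun e ent => if !(entities.contains ent.1) then e else pvPass q [idx] tmp e) d
      = if table.countP (fun ent => entities.contains ent.1) = 0 then d
        else pvPass q (List.replicate (table.countP (fun ent => entities.contains ent.1)) idx) tmp d := by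
  induction table generalizing d with
  | nil => rfl
  | cons ent rest ih =>
    rw [List.foldl_cons, List.countP_cons]
    by_cases hm : entities.contains ent.1 = true
    · rw [if_neg (by rw [hm]; simp), hm, if_pos rfl, ih]
      by_cases h0 : rest.countP (fun ent => entities.contains ent.1) = 0
      · rw [if_pos h0, h0, if_neg (by omega), List.replicate_one]
      · rw [if_neg h0, if_neg (by omega),
            pv_pass_pass q _ _ tmp d hn, List.replicate_succ, List.singleton_append]
    · have hm' : entities.contains ent.1 = false := by
        cases hcc : entities.contains ent.1
        · rfl
        · exact absurd hcc hm
      rw [if_pos (by rw [hm']; rfl), hm']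
      simp only [Bool.false_eq_true, if_false, Nat.add_zero]
      exact ih d

-- B's incremental set building = set(concatenated key lists)
lemma pv_upd_fold {β : Type} (l : List β) (f : β → List String) (s : PySem.Set String) :
    l.foldl (fun s2 b => PySem.Set.update s2 (f b)) s = PySem.Set.update s (l.flatMap f) := by
  induction l generalizing s with
  | nil => simp [PySem.Set.update]
  | cons b r ih =>
    rw [List.foldl_cons, ih, List.flatMap_cons, PySem.Set.update_append]

lemma pv_seen_eq (table : List (String × List (String × List (String × Int)))) :
    table.foldl
      (fun s ep => ep.2.foldl (fun s2 rp => PySem.Set.update s2 (rp.2.map Prod.fst)) s)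
      PySem.Set.empty
    = get_headers_in_table_A table := by
  have hinner : (fun (s : PySem.Set String) (ep : String × List (String × List (String × Int))) =>
      ep.2.foldl (fun s2 rp => PySem.Set.update s2 (rp.2.map Prod.fst)) s)
      = fun s ep => PySem.Set.update s (ep.2.flatMap (fun rp => rp.2.map Prod.fst)) := by
    funext s ep; exact pv_upd_fold _ _ s
  rw [hinner, pv_upd_fold table (fun ep => ep.2.flatMap (fun rp => rp.2.map Prod.fst)) PySem.Set.empty]
  show PySem.Set.update [] _ = _
  rw [PySem.Set.update_nil_left]
  unfold get_headers_in_table_A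
  congr 1
  have hin : (fun (h : List String) (ep : String × List (String × List (String × Int))) =>
      ep.2.foldl (fun h2 rp => h2 ++ rp.2.map Prod.fst) h)
      = fun h ep => h ++ ep.2.flatMap (fun rp => rp.2.map Prod.fst) := by
    funext h ep; exact PySem.List.foldl_append_eq_flatMap _ _ h
  rw [hin, PySem.List.foldl_append_eq_flatMap]
  simp

lemma pv_contains_ofList (xs : List String) (x : String) :
    PySem.Set.contains (PySem.Set.ofList xs) x = xs.contains x := by
  rw [Bool.eq_iff_iff, PySem.Set.contains_iff, PySem.Set.mem_ofList, List.contains_iff_mem]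

-- A's filter condition equals B's
lemma pv_cond_eq (labeled_headers : List String) (keep_new : Bool) :
    (fun h => (keep_new && !(labeled_headers.contains h)) || (!keep_new && labeled_headers.contains h))
      = fun h => labeled_headers.contains h != keep_new := by
  funext h
  cases hc : labeled_headers.contains h <;> cases keep_new <;> simp

lemma pv_step_eq (entities labeled_headers : List String) (keep_new : Bool)
    (p : String × List (String × List (String × List (String × Int))))
    (eh : PySem.Dict String (List String)) :
    (if p.1 == "extracted_version" then eh
     else p.2.foldl
       (fun eh2 ent =>
         if !(entities.contains ent.1) then eh2
         else (get_headers_in_table_A p.2).foldl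
           (fun eh3 h =>
             if (keep_new && !(labeled_headers.contains h)) || (!keep_new && labeled_headers.contains h)
             then eh3.insert h (eh3.getD h [] ++ [p.1]) else eh3)
           eh2)
       eh)
    = (if p.1 == "extracted_version" then eh
       else if p.2.countP (fun ent => PySem.Set.contains (PySem.Set.ofList entities) ent.1) = 0 then eh
       else
         (p.2.foldl
             (fun s ep => ep.2.foldl (fun s2 rp => PySem.Set.update s2 (rp.2.map Prod.fst)) s)
             PySem.Set.empty).foldl
           (fun eh2 h =>
             if PySem.Set.contains (PySem.Set.ofList labeled_headers) h != keep_new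
             then eh2.insert h (eh2.getD h []
               ++ List.replicate (p.2.countP (fun ent => PySem.Set.contains (PySem.Set.ofList entities) ent.1)) p.1)
             else eh2)
           eh) := by
  simp only [pv_contains_ofList]
  by_cases hev : (p.1 == "extracted_version") = true
  · rw [if_pos hev, if_pos hev]
  · rw [if_neg hev, if_neg hev]
    rw [pv_seen_eq p.2]
    have hA : (fun (eh2 : PySem.Dict String (List String)) (ent : String × List (String × List (String × Int))) =>
        if !(entities.contains ent.1) then eh2
        else (get_headers_in_table_A p.2).foldl
          (fun eh3 h =>
            if (keep_new && !(labeled_headers.contains h)) || (!keep_new && labeled_headers.contains h)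
            then eh3.insert h (eh3.getD h [] ++ [p.1]) else eh3)
          eh2)
        = fun eh2 ent => if !(entities.contains ent.1) then eh2
            else pvPass (fun h => labeled_headers.contains h != keep_new) [p.1]
                   (get_headers_in_table_A p.2) eh2 := by
      funext eh2 ent
      by_cases hm : (!(entities.contains ent.1)) = true
      · rw [if_pos hm, if_pos hm]
      · rw [if_neg hm, if_neg hm]
        simp only [pvPass]
        congr 1
        funext eh3 h
        rw [show ((keep_new && !(labeled_headers.contains h)) || (!keep_new && labeled_headers.contains h))
              = (labeled_headers.contains h != keep_new)
            from congrFun (pv_cond_eq labeled_headers keep_new) h]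
    rw [hA, pv_entity_fold entities (fun h => labeled_headers.contains h != keep_new)
          (get_headers_in_table_A p.2) p.1 p.2 eh (PySem.Set.nodup_ofList _)]
    rfl

def load_header_spec_proof : Claim_equal_load_header := by
  intro data entities labeled_headers keep_new _
  unfold Spec_load_header load_header load_header_alt
  dsimp only
  congr 1
  congr 1
  funext eh p
  exact pv_step_eq entities labeled_headers keep_new p eh

-- ===== VERDICT (by name: the statement is the Claim_ definition above) =====
theorem load_header_spec : Claim_equal_load_header := load_header_spec_proof
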